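-- pv_equiv track=rewrite | github.com/S0jer/algorithms-and-data-structures-course-2021 | ASD/Egzamin/2018_19_T1Z6.py | impatientbob
-- ===== SOURCE A (Python) =====
-- def impatientbob(T, k):
--     n = len(T)
--     inf = 100000
--     T.sort(key=lambda T: T[1])
--
--     dp = [[inf] * (k + 1) for _ in range(n)]
--
--     for i in range(n):
--         dp[i][1] = 0
--
--     for i in range(n):
--         for j in range(i):
--             for z in range(k):
--                 if T[i][0] >= T[j][1]:
--                     dp[i][z + 1] = min(dp[j][z] + abs(T[j][1] - T[i][0]), dp[i][z + 1])
--
--     best = inf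
--     for i in range(n):
--         best = min(best, dp[i][k])
--
--     if best == inf:
--         return None
--     return best
-- ===== SOURCE B (Python) =====
-- def impatientbob(T, k):
--     # Same return value as the original; sorts T in place like the original.
--     # Per-level DP with a prefix-min array and binary search over the sorted
--     # end times, instead of rescanning all earlier intervals for every cell.
--     n = len(T)
--     inf = 100000
--     T.sort(key=lambda t: t[1])
--     if n == 0:
--         return None
--     ends = [t[1] for t in T]
--     starts = [t[0] for t in T]
--     level = [0] * n
--     for _ in range(k - 1):
--         pref = [0] * n
--         m = level[0] - ends[0]
--         for j in range(n):
--             v = level[j] - ends[j]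
--             if v < m:
--                 m = v
--             pref[j] = m
--         nxt = [inf] * n
--         for i in range(n):
--             lo, hi = 0, n
--             while lo < hi:
--                 mid = (lo + hi) // 2
--                 if ends[mid] <= starts[i]:
--                     lo = mid + 1
--                 else:
--                     hi = mid
--             m2 = min(lo, i)
--             if m2 > 0:
--                 cand = starts[i] + pref[m2 - 1]
--                 if cand < inf:
--                     nxt[i] = cand
--         level = nxt
--     best = min(level)
--     if best == inf:
--         return None
--     return best
-- ===== Notes on version B (the rewrite author's own statement) =====
-- stated objective: faster
-- what changed: Replaces the O(n^2*k) triple loop (for each interval rescan all earlier intervals for every level) by a level-by-level DP: per level one prefix-min array of dp[j]-end[j] plus a binary search over the sorted end times picks the best predecessor in O(log n), giving O(n*k*log n).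
import Mathlib
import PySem

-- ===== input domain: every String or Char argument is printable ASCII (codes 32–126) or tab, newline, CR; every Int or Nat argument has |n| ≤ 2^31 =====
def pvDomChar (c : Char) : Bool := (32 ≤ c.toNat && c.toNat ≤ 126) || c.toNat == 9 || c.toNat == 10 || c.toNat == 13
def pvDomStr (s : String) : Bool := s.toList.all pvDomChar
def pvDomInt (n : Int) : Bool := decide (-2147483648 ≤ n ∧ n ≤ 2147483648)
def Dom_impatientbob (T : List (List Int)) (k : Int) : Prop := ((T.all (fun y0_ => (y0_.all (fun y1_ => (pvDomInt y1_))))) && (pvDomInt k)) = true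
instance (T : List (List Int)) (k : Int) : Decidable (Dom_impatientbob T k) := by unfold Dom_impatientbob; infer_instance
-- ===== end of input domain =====

-- B replaces A's O(n^2*k) triple loop by a per-level prefix-min array plus binary
-- search over the sorted end times (O(n*k*log n)); equal return value on Pre_;
-- both the Python A and the Python B sort T in place (same observable mutation).

-- ===== PORT A =====
def impatientbob (T : List (List Int)) (k : Int) : Option Int :=
  let n : Int := PySem.List.len T
  let inf : Int := 100000
  let Ts := PySem.List.sorted T (fun r => PySem.List.pyGetD r 1 0) false
  let dp : List (List Int) :=
    (PySem.List.pyRange 0 n 1).map (fun _ => PySem.List.pyRepeat [inf] (k + 1))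
  let dp := (PySem.List.pyRange 0 n 1).foldl (fun dp i =>
      PySem.List.pySetD dp i (PySem.List.pySetD (PySem.List.pyGetD dp i []) 1 0)) dp
  let dp := (PySem.List.pyRange 0 n 1).foldl (fun dp i =>
      (PySem.List.pyRange 0 i 1).foldl (fun dp j =>
        (PySem.List.pyRange 0 k 1).foldl (fun dp z =>
          if PySem.List.pyGetD (PySem.List.pyGetD Ts i []) 0 0 ≥
             PySem.List.pyGetD (PySem.List.pyGetD Ts j []) 1 0 then
            PySem.List.pySetD dp i (PySem.List.pySetD (PySem.List.pyGetD dp i []) (z + 1)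
              (min (PySem.List.pyGetD (PySem.List.pyGetD dp j []) z 0 +
                    |PySem.List.pyGetD (PySem.List.pyGetD Ts j []) 1 0 -
                     PySem.List.pyGetD (PySem.List.pyGetD Ts i []) 0 0|)
                   (PySem.List.pyGetD (PySem.List.pyGetD dp i []) (z + 1) 0)))
          else dp) dp) dp) dp
  let best := (PySem.List.pyRange 0 n 1).foldl (fun b i =>
      min b (PySem.List.pyGetD (PySem.List.pyGetD dp i []) k 0)) inf
  if best = inf then none else some best

-- ===== PORT B =====
-- hand-written binary search from Source B ('while lo < hi')
def pvBisect (ends : List Int) (s lo hi : Int) : Int :=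
  if h : lo < hi then
    let mid := PySem.Int.floordiv (lo + hi) 2
    if PySem.List.pyGetD ends mid 0 ≤ s then pvBisect ends s (mid + 1) hi
    else pvBisect ends s lo mid
  else lo
termination_by (hi - lo).toNat
decreasing_by
  · have h1 := PySem.Int.floordiv_two_mid_bounds (le_of_lt h)
    have h2 : PySem.Int.floordiv (lo + hi) 2 < hi :=
      (PySem.Int.floordiv_lt_iff_lt_mul (by omega)).mpr (by omega)
    omega
  · have h1 := PySem.Int.floordiv_two_mid_bounds (le_of_lt h)
    have h2 : PySem.Int.floordiv (lo + hi) 2 < hi :=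
      (PySem.Int.floordiv_lt_iff_lt_mul (by omega)).mpr (by omega)
    omega

def impatientbob_alt (T : List (List Int)) (k : Int) : Option Int :=
  let n : Int := PySem.List.len T
  let inf : Int := 100000
  let Ts := PySem.List.sorted T (fun t => PySem.List.pyGetD t 1 0) false
  if n = 0 then none else
  let ends := Ts.map (fun t => PySem.List.pyGetD t 1 0)
  let starts := Ts.map (fun t => PySem.List.pyGetD t 0 0)
  let level : List Int := PySem.List.pyRepeat [0] n
  let level := (PySem.List.pyRange 0 (k - 1) 1).foldl (fun level _ =>
    let pm := (PySem.List.pyRange 0 n 1).foldl (fun (pm : List Int × Int) j =>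
        let v := PySem.List.pyGetD level j 0 - PySem.List.pyGetD ends j 0
        let m := if v < pm.2 then v else pm.2
        (PySem.List.pySetD pm.1 j m, m))
      (PySem.List.pyRepeat [0] n,
       PySem.List.pyGetD level 0 0 - PySem.List.pyGetD ends 0 0)
    let pref := pm.1
    (PySem.List.pyRange 0 n 1).foldl (fun nxt i =>
        let lo := pvBisect ends (PySem.List.pyGetD starts i 0) 0 n
        let m2 := min lo i
        if m2 > 0 then
          let cand := PySem.List.pyGetD starts i 0 + PySem.List.pyGetD pref (m2 - 1) 0
          if cand < inf then PySem.List.pySetD nxt i cand else nxt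
        else nxt)
      (PySem.List.pyRepeat [inf] n)) level
  match PySem.List.min? level (fun x => x) with
  | none => none
  | some best => if best = inf then none else some best

-- ===== PRECONDITION & SPEC =====
-- Pre_ excludes exactly the inputs where the Python A raises IndexError:
-- a row with fewer than 2 entries (read by the sort key / dp updates), or a
-- nonempty T with k < 1 (dp rows have k+1 ≤ 1 cells but dp[i][1] is written).
def Pre_impatientbob (T : List (List Int)) (k : Int) : Prop :=
  (∀ r ∈ T, 2 ≤ r.length) ∧ (T = [] ∨ 1 ≤ k)
instance (T : List (List Int)) (k : Int) : Decidable (Pre_impatientbob T k) := by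
  unfold Pre_impatientbob; infer_instance

def pvWitness_impatientbob : List (List Int) × Int := ([[0, 2], [3, 5]], 2)

def Spec_impatientbob (T : List (List Int)) (k : Int) (out : Option Int) : Prop := out = impatientbob_alt T k
instance (T : List (List Int)) (k : Int) (out : Option Int) : Decidable (Spec_impatientbob T k out) := by unfold Spec_impatientbob; infer_instance

-- ===== CLAIM (what is proved, stated in full; the proofs are below) =====
def Claim_equal_impatientbob : Prop := ∀ (T : List (List Int)) (k : Int), Dom_impatientbob T k → Pre_impatientbob T k → Spec_impatientbob T k (impatientbob T k)

-- ===== LEMMAS AND PROOFS =====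

-- start / end time of the i-th interval of the sorted list S
def pvS (S : List (List Int)) (i : ℕ) : Int := (S.getD i []).getD 0 0
def pvE (S : List (List Int)) (j : ℕ) : Int := (S.getD j []).getD 1 0

-- the common DP table value (A's recurrence; column 0 = 100000)
def pvLev (S : List (List Int)) : ℕ → ℕ → Int
  | 0, _ => 100000
  | 1, _ => 0
  | (z + 2), i => (List.range i).foldl
      (fun a j => if pvS S i ≥ pvE S j then
          min (pvLev S (z + 1) j + |pvE S j - pvS S i|) a else a) 100000

def pvBest (S : List (List Int)) (kN : ℕ) : Int :=
  (List.range S.length).foldl (fun b i => min b (pvLev S kN i)) 100000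

def pvColInit (z : ℕ) : Int := if z = 0 then 0 else 100000

-- column z+1 of A's row i after the first j' inner iterations
def pvPart (S : List (List Int)) (i z j' : ℕ) : Int :=
  (List.range j').foldl
    (fun a j => if pvS S i ≥ pvE S j then
        min (pvLev S z j + |pvE S j - pvS S i|) a else a) (pvColInit z)
def pvRowOf (S : List (List Int)) (kN m : ℕ) : List Int :=
  100000 :: (List.range kN).map (fun z => pvLev S (z + 1) m)
def pvRowPart (S : List (List Int)) (kN i j' : ℕ) : List Int :=
  100000 :: (List.range kN).map (fun z => pvPart S i z j')
def pvRow1 (kN : ℕ) : List Int :=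
  100000 :: (List.range kN).map (fun z => pvColInit z)
def pvDpAt (S : List (List Int)) (kN i : ℕ) : List (List Int) :=
  (List.range S.length).map (fun m => if m < i then pvRowOf S kN m else pvRow1 kN)
def pvMid (S : List (List Int)) (kN i : ℕ) (r : List Int) : List (List Int) :=
  (List.range S.length).map
    (fun m => if m = i then r else if m < i then pvRowOf S kN m else pvRow1 kN)

-- B's running prefix minimum of v 0, …, v j
def pvPref (v : ℕ → Int) : ℕ → Int
  | 0 => v 0
  | (j + 1) => if v (j + 1) < pvPref v j then v (j + 1) else pvPref v j

-- ---- generic list helpers ----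
theorem pvGetDApp {α : Type} (l : List α) (x : α) (t : List α) (d : α) :
    (l ++ x :: t).getD l.length d = x := by
  induction l with
  | nil => rfl
  | cons a l ih => simpa using ih

theorem pvSetApp {α : Type} (l : List α) (x : α) (t : List α) (v : α) :
    (l ++ x :: t).set l.length v = l ++ v :: t := by
  induction l with
  | nil => rfl
  | cons a l ih => simpa using ih

theorem pvSelfEqMapRange (l : List Int) :
    l = (List.range l.length).map (fun c => l.getD c 0) := by
  apply List.ext_getElem
  · simp
  · intro i h1 h2
    simp [List.getD_eq_getElem?_getD, List.getElem?_eq_getElem h1]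
theorem pvSetMapRange {α : Type} (f : ℕ → α) (n m : ℕ) (v : α) :
    ((List.range n).map f).set m v
      = (List.range n).map (fun c => if c = m then v else f c) := by
  apply List.ext_getElem
  · simp
  · intro i h1 h2
    simp only [List.getElem_set, List.getElem_map, List.getElem_range]
    by_cases h : m = i <;> simp [h, eq_comm]

-- a fold that sets every index i to g of itself, over a replicate
theorem pvSetAll {α : Type} (g : α → α) (d0 : α) (a : α) :
    ∀ (n : ℕ) (tail : List α),
      (List.range n).foldl (fun l i => l.set i (g (l.getD i d0)))
        (List.replicate n a ++ tail) = List.replicate n (g a) ++ tail := by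
  intro n
  induction n with
  | zero => intro tail; simp
  | succ n ih =>
    intro tail
    rw [List.range_succ, List.foldl_append]
    have e1 : List.replicate (n+1) a ++ tail = List.replicate n a ++ (a :: tail) := by
      simp [List.replicate_succ']
    rw [e1, ih (a :: tail)]
    have hl : (List.replicate n (g a) : List α).length = n := by simp
    have e2 : (List.replicate n (g a) ++ a :: tail).getD n d0 = a := by
      have := pvGetDApp (List.replicate n (g a)) a tail d0
      simpa [hl] using this
    have e3 : (List.replicate n (g a) ++ a :: tail).set n (g a)
        = List.replicate n (g a) ++ g a :: tail := by
      have := pvSetApp (List.replicate n (g a)) a tail (g a)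
      simpa [hl] using this
    simp only [List.foldl_cons, List.foldl_nil, e2, e3]
    simp [List.replicate_succ']

-- a fold that conditionally sets index i to w i, over a replicate
theorem pvCondSetAll (c : ℕ → Prop) [DecidablePred c] (w : ℕ → Int) (d : Int) (n : ℕ) :
    ∀ t ≤ n,
    (List.range t).foldl (fun l i => if c i then l.set i (w i) else l)
      (List.replicate n d)
      = (List.range n).map (fun i => if i < t ∧ c i then w i else d) := by
  intro t
  induction t with
  | zero => intro _; simp [List.eq_replicate_iff]
  | succ t ih =>
    intro ht
    rw [List.range_succ, List.foldl_append, ih (by omega)]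
    simp only [List.foldl_cons, List.foldl_nil]
    by_cases hc : c t
    · rw [if_pos hc, pvSetMapRange]
      apply List.map_congr_left
      intro x hx
      simp only [List.mem_range] at hx
      by_cases hxt : x = t
      · subst hxt; simp [hc]
      · by_cases hcx : c x
        · simp [hcx, hxt, show (x < t ↔ x < t + 1) from by omega]
        · simp [hcx, hxt]
    · rw [if_neg hc]
      apply List.map_congr_left
      intro x hx
      simp only [List.mem_range] at hx
      by_cases hxt : x = t
      · subst hxt; simp [hc]
      · by_cases hcx : c x
        · simp [hcx, show (x < t ↔ x < t + 1) from by omega]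
        · simp [hcx]
theorem pvGetDMapSelf (f : List Int → Int) (S : List (List Int)) (j : ℕ) (hj : j < S.length) :
    (List.map f S).getD j 0 = f (S.getD j []) := by
  rw [List.getD_eq_getElem?_getD, List.getElem?_map, List.getElem?_eq_getElem hj]
  simp only [Option.map_some, Option.getD_some]
  rw [show S.getD j [] = S[j] from by
    rw [List.getD_eq_getElem?_getD, List.getElem?_eq_getElem hj]; rfl]

-- ---- bounds on the DP values ----
theorem pvLev_bounds (S : List (List Int)) (z i : ℕ) :
    0 ≤ pvLev S z i ∧ pvLev S z i ≤ 100000 := by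
  induction z using Nat.strong_induction_on generalizing i with
  | _ z ih =>
    match z with
    | 0 => simp [pvLev]
    | 1 => simp [pvLev]
    | (z + 2) =>
      show 0 ≤ (List.range i).foldl _ 100000 ∧ (List.range i).foldl _ 100000 ≤ 100000
      refine List.foldlRecOn (motive := fun a => 0 ≤ a ∧ a ≤ 100000) _ _ (by norm_num) ?_
      intro b hb j hj
      split_ifs with hc
      · have h1 := (ih (z + 1) (by omega) j).1
        have h2 := abs_nonneg (pvE S j - pvS S i)
        constructor
        · exact le_min (by omega) hb.1
        · exact le_trans (min_le_right _ _) hb.2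
      · exact hb

-- ---- A-side ----
theorem pvRowPart_zero (S : List (List Int)) (kN i : ℕ) :
    pvRowPart S kN i 0 = pvRow1 kN := by
  simp [pvRowPart, pvRow1, pvPart]
theorem pvPart_self (S : List (List Int)) (i z : ℕ) :
    pvPart S i z i = pvLev S (z + 1) i := by
  match z with
  | 0 =>
    show (List.range i).foldl _ (pvColInit 0) = pvLev S 1 i
    have : ∀ l : List ℕ, l.foldl
        (fun a j => if pvS S i ≥ pvE S j then
          min (pvLev S 0 j + |pvE S j - pvS S i|) a else a) 0 = 0 := by
      intro l
      refine List.foldlRecOn (motive := fun a => a = 0) _ _ rfl ?_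
      intro b hb j hj
      split_ifs with hc
      · have h2 := abs_nonneg (pvE S j - pvS S i)
        subst hb
        simp [pvLev]
        omega
      · exact hb
    simpa [pvColInit, pvLev] using this (List.range i)
  | (z + 1) =>
    simp [pvPart, pvColInit, pvLev]
theorem pvRowPart_self (S : List (List Int)) (kN i : ℕ) :
    pvRowPart S kN i i = pvRowOf S kN i := by
  simp only [pvRowPart, pvRowOf]
  congr 1
  exact List.map_congr_left (fun z _ => pvPart_self S i z)
theorem pvRow1_eq_set (kN : ℕ) (h : 1 ≤ kN) :
    (List.replicate (kN + 1) (100000 : Int)).set 1 0 = pvRow1 kN := by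
  obtain ⟨m, rfl⟩ : ∃ m, kN = m + 1 := ⟨kN - 1, by omega⟩
  simp [pvRow1, List.range_succ_eq_map, pvColInit, List.replicate_succ,
    List.map_map, Function.comp_def, List.map_const']
theorem pvMid_getD (S : List (List Int)) (kN i : ℕ) (r : List Int) (m : ℕ)
    (hm : m < S.length) :
    (pvMid S kN i r).getD m []
      = (if m = i then r else if m < i then pvRowOf S kN m else pvRow1 kN) := by
  unfold pvMid
  rw [PySem.List.getD_map_range _ _ _ _ hm]
theorem pvRowOf_getD (S : List (List Int)) (kN j t : ℕ) (ht : t ≤ kN) :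
    (pvRowOf S kN j).getD t 0 = pvLev S t j := by
  match t with
  | 0 => rfl
  | (m + 1) =>
    show ((List.range kN).map (fun z => pvLev S (z + 1) j)).getD m 0 = _
    rw [PySem.List.getD_map_range _ _ _ _ (by omega)]
theorem pvZsweep (S : List (List Int)) (kN i j : ℕ) (r : List Int)
    (hi : i < S.length) (hj : j < i) (hr : r.length = kN + 1) (G : Int) :
    ∀ t ≤ kN,
    (List.range t).foldl (fun dp z =>
        dp.set i ((dp.getD i []).set (z + 1)
          (min ((dp.getD j []).getD z 0 + G) ((dp.getD i []).getD (z + 1) 0))))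
      (pvMid S kN i r)
    = pvMid S kN i ((List.range (kN + 1)).map
        (fun c => if 1 ≤ c ∧ c ≤ t then min (pvLev S (c - 1) j + G) (r.getD c 0)
                  else r.getD c 0)) := by
  intro t
  induction t with
  | zero =>
    intro _
    simp only [List.range_zero, List.foldl_nil]
    congr 1
    conv_lhs => rw [pvSelfEqMapRange r]
    rw [hr]
    apply List.map_congr_left
    intro c _
    rw [if_neg (by omega)]
  | succ t ih =>
    intro ht
    rw [List.range_succ, List.foldl_append, ih (by omega)]
    simp only [List.foldl_cons, List.foldl_nil]
    have hne : j ≠ i := by omega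
    rw [pvMid_getD S kN i _ i hi, if_pos rfl]
    rw [pvMid_getD S kN i _ j (by omega), if_neg hne, if_pos hj]
    rw [pvRowOf_getD S kN j t (by omega)]
    rw [PySem.List.getD_map_range _ _ _ _ (by omega : t + 1 < kN + 1)]
    rw [if_neg (by omega)]
    rw [pvSetMapRange]
    have hrow : ((List.range (kN + 1)).map fun c =>
        if c = t + 1 then min (pvLev S t j + G) (r.getD (t + 1) 0)
        else if 1 ≤ c ∧ c ≤ t then min (pvLev S (c - 1) j + G) (r.getD c 0)
        else r.getD c 0)
      = ((List.range (kN + 1)).map fun c =>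
        if 1 ≤ c ∧ c ≤ t + 1 then min (pvLev S (c - 1) j + G) (r.getD c 0)
        else r.getD c 0) := by
      apply List.map_congr_left
      intro c _
      by_cases hc : c = t + 1
      · subst hc; simp
      · by_cases h1 : 1 ≤ c ∧ c ≤ t
        · rw [if_neg hc, if_pos h1, if_pos (by omega)]
        · rw [if_neg hc, if_neg h1, if_neg (by omega)]
    rw [hrow]
    unfold pvMid
    rw [pvSetMapRange]
    apply List.map_congr_left
    intro m _
    by_cases hm : m = i <;> simp [hm]
theorem pvJfold (S : List (List Int)) (kN i : ℕ) (hi : i < S.length) :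
    ∀ j' ≤ i,
      (List.range j').foldl (fun dp j =>
        (List.range kN).foldl (fun dp z =>
          if pvS S i ≥ pvE S j then
            dp.set i ((dp.getD i []).set (z + 1)
              (min ((dp.getD j []).getD z 0 + |pvE S j - pvS S i|)
                   ((dp.getD i []).getD (z + 1) 0)))
          else dp) dp)
        (pvMid S kN i (pvRowPart S kN i 0))
      = pvMid S kN i (pvRowPart S kN i j') := by
  intro j'
  induction j' with
  | zero => intro _; simp
  | succ j' ih =>
    intro hj'
    rw [List.range_succ, List.foldl_append, ih (by omega)]
    simp only [List.foldl_cons, List.foldl_nil]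
    by_cases hc : pvS S i ≥ pvE S j'
    · have hbody : (fun (dp : List (List Int)) (z : ℕ) =>
          if pvS S i ≥ pvE S j' then
            dp.set i ((dp.getD i []).set (z + 1)
              (min ((dp.getD j' []).getD z 0 + |pvE S j' - pvS S i|)
                   ((dp.getD i []).getD (z + 1) 0)))
          else dp)
        = (fun (dp : List (List Int)) (z : ℕ) =>
            dp.set i ((dp.getD i []).set (z + 1)
              (min ((dp.getD j' []).getD z 0 + |pvE S j' - pvS S i|)
                   ((dp.getD i []).getD (z + 1) 0)))) := by
        funext dp z; rw [if_pos hc]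
      rw [hbody]
      rw [pvZsweep S kN i j' _ hi (by omega) (by simp [pvRowPart]) _ kN le_rfl]
      congr 1
      rw [List.range_succ_eq_map, List.map_cons, List.map_map]
      unfold pvRowPart
      congr 1
      apply List.map_congr_left
      intro z hz
      simp only [List.mem_range] at hz
      show (if 1 ≤ z + 1 ∧ z + 1 ≤ kN then
          min (pvLev S (z + 1 - 1) j' + |pvE S j' - pvS S i|)
              ((pvRowPart S kN i j').getD (z + 1) 0)
        else (pvRowPart S kN i j').getD (z + 1) 0) = pvPart S i z (j' + 1)
      rw [if_pos ⟨by omega, by omega⟩]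
      have hgd : (pvRowPart S kN i j').getD (z + 1) 0 = pvPart S i z j' := by
        show ((List.range kN).map (fun z => pvPart S i z j')).getD z 0 = _
        rw [PySem.List.getD_map_range _ _ _ _ hz]
      rw [hgd]
      show min (pvLev S z j' + |pvE S j' - pvS S i|) (pvPart S i z j') = _
      unfold pvPart
      rw [List.range_succ, List.foldl_append]
      simp only [List.foldl_cons, List.foldl_nil]
      rw [if_pos hc]
    · have hbody : (fun (dp : List (List Int)) (z : ℕ) =>
          if pvS S i ≥ pvE S j' then
            dp.set i ((dp.getD i []).set (z + 1)
              (min ((dp.getD j' []).getD z 0 + |pvE S j' - pvS S i|)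
                   ((dp.getD i []).getD (z + 1) 0)))
          else dp)
        = (fun (dp : List (List Int)) (_ : ℕ) => dp) := by
        funext dp z; rw [if_neg hc]
      rw [hbody, PySem.List.foldl_ignore]
      congr 1
      unfold pvRowPart
      congr 1
      apply List.map_congr_left
      intro z hz
      show pvPart S i z j' = pvPart S i z (j' + 1)
      unfold pvPart
      rw [List.range_succ, List.foldl_append]
      simp only [List.foldl_cons, List.foldl_nil]
      rw [if_neg hc]
theorem pvIfold (S : List (List Int)) (kN : ℕ) :
    ∀ i ≤ S.length,
      (List.range i).foldl (fun dp i =>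
        (List.range i).foldl (fun dp j =>
          (List.range kN).foldl (fun dp z =>
            if pvS S i ≥ pvE S j then
              dp.set i ((dp.getD i []).set (z + 1)
                (min ((dp.getD j []).getD z 0 + |pvE S j - pvS S i|)
                     ((dp.getD i []).getD (z + 1) 0)))
            else dp) dp) dp)
        (pvDpAt S kN 0)
      = pvDpAt S kN i := by
  intro i
  induction i with
  | zero => intro _; rfl
  | succ i ih =>
    intro hi
    rw [List.range_succ, List.foldl_append, ih (by omega)]
    simp only [List.foldl_cons, List.foldl_nil]
    have h0 : pvDpAt S kN i = pvMid S kN i (pvRowPart S kN i 0) := by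
      rw [pvRowPart_zero]
      unfold pvDpAt pvMid
      apply List.map_congr_left
      intro m _
      by_cases hm : m = i
      · subst hm; simp
      · simp [hm]
    rw [h0, pvJfold S kN i (by omega) i le_rfl, pvRowPart_self]
    unfold pvMid pvDpAt
    apply List.map_congr_left
    intro m _
    by_cases hm : m = i
    · subst hm; simp
    · have : (m < i) ↔ (m < i + 1) := by omega
      simp [hm, this]
theorem pvA_main (T : List (List Int)) (k : Int) (hT : T ≠ []) (hk : 1 ≤ k) :
    impatientbob T k =
      (if pvBest (PySem.List.sorted T (fun r => PySem.List.pyGetD r 1 0) false) k.toNat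
          = 100000 then none
       else some (pvBest (PySem.List.sorted T (fun r => PySem.List.pyGetD r 1 0) false) k.toNat)) := by
  have hk' : k = (k.toNat : Int) := by omega
  have hk1 : 1 ≤ k.toNat := by omega
  set S := PySem.List.sorted T (fun r => PySem.List.pyGetD r 1 0) false with hS
  have hlen : S.length = T.length := PySem.List.length_sorted T _ false
  have hset1 : ∀ (l : List Int), PySem.List.pySetD l (1 : Int) 0 = l.set 1 0 := by
    intro l
    rw [PySem.List.pySetD_of_nonneg _ _ (by norm_num)]
    norm_num
  rw [hk']
  unfold impatientbob
  simp only [PySem.List.len_eq, PySem.List.pyRange_zero, PySem.List.pyRepeat_singleton,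
    List.foldl_map, List.map_map, Int.toNat_natCast, Function.comp_def,
    ← Nat.cast_add_one, PySem.List.pySetD_natCast, PySem.List.pyGetD_natCast,
    PySem.List.pyGetD_ofNat', hset1, Int.toNat_natCast, List.map_const',
    List.length_range, ← hlen]
  rw [show (PySem.List.sorted T fun r => r.getD 1 0) = S from by
        rw [hS, ← (funext (fun r => PySem.List.pyGetD_ofNat' r 1 0) :
          (fun (r : List Int) => PySem.List.pyGetD r 1 0) = (fun (r : List Int) => r.getD 1 0))]]
  -- phase 1
  have hphase1 :
      List.foldl (fun (x : List (List Int)) y => x.set y ((x.getD y []).set 1 0))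
        (List.replicate S.length (List.replicate (k.toNat + 1) (100000 : Int)))
        (List.range S.length)
      = pvDpAt S k.toNat 0 := by
    rw [← List.append_nil (List.replicate S.length (List.replicate (k.toNat + 1) (100000 : Int)))]
    have h1 := pvSetAll (fun (row : List Int) => row.set 1 0) ([] : List Int)
      (List.replicate (k.toNat + 1) (100000 : Int)) S.length []
    simp only at h1
    rw [h1, List.append_nil, pvRow1_eq_set _ hk1]
    simp [pvDpAt, List.map_const']
  rw [hphase1]
  -- main fold
  have HI := pvIfold S k.toNat S.length le_rfl
  unfold pvS pvE at HI
  rw [HI]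
  -- best fold
  have hbest :
      List.foldl (fun (x : Int) y => min x (((pvDpAt S k.toNat S.length).getD y []).getD k.toNat 0))
        100000 (List.range S.length)
      = pvBest S k.toNat := by
    unfold pvBest
    apply PySem.List.foldl_congr_mem
    intro acc x hx
    simp only [List.mem_range] at hx
    unfold pvDpAt
    rw [PySem.List.getD_map_range _ _ _ _ hx, if_pos hx, pvRowOf_getD _ _ _ _ le_rfl]
  rw [hbest]

-- ---- B-side ----
theorem pvBisect_spec (ends : List Int) (s : Int)
    (mono : ∀ p q : ℕ, p ≤ q → q < ends.length → ends.getD p 0 ≤ ends.getD q 0) :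
    ∀ (fuel : ℕ) (lo hi : Int), (hi - lo).toNat ≤ fuel → 0 ≤ lo → lo ≤ hi → hi ≤ (ends.length : Int) →
    (∀ j : ℕ, (j : Int) < lo → ends.getD j 0 ≤ s) →
    (∀ j : ℕ, hi ≤ (j : Int) → j < ends.length → s < ends.getD j 0) →
    0 ≤ pvBisect ends s lo hi ∧ pvBisect ends s lo hi ≤ (ends.length : Int) ∧
    (∀ j : ℕ, (j : Int) < pvBisect ends s lo hi → ends.getD j 0 ≤ s) ∧
    (∀ j : ℕ, pvBisect ends s lo hi ≤ (j : Int) → j < ends.length → s < ends.getD j 0) := by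
  intro fuel
  induction fuel with
  | zero =>
    intro lo hi hfuel h0 hlohi hhi hleft hright
    have hEq : lo = hi := by omega
    rw [pvBisect.eq_def, dif_neg (by omega)]
    exact ⟨h0, by omega, hleft, fun j hj hjlen => hright j (by omega) hjlen⟩
  | succ fuel ih =>
    intro lo hi hfuel h0 hlohi hhi hleft hright
    rw [pvBisect.eq_def]
    by_cases h : lo < hi
    · rw [dif_pos h]
      simp only []
      have h1 := PySem.Int.floordiv_two_mid_bounds (le_of_lt h)
      have h2 : PySem.Int.floordiv (lo + hi) 2 < hi :=
        (PySem.Int.floordiv_lt_iff_lt_mul (by omega)).mpr (by omega)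
      obtain ⟨mN, hmN⟩ : ∃ mN : ℕ, PySem.Int.floordiv (lo + hi) 2 = (mN : Int) :=
        ⟨(PySem.Int.floordiv (lo + hi) 2).toNat, by omega⟩
      rw [hmN, PySem.List.pyGetD_natCast]
      have hmNlen : mN < ends.length := by omega
      by_cases hcmp : ends.getD mN 0 ≤ s
      · rw [if_pos hcmp]
        have : ((mN : Int) + 1) = ((mN + 1 : ℕ) : Int) := by omega
        rw [this]
        refine ih ((mN : ℕ) + 1) hi (by omega) (by omega) (by omega) hhi ?_ hright
        intro j hj
        have hjN : j ≤ mN := by omega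
        exact le_trans (mono j mN hjN hmNlen) hcmp
      · rw [if_neg hcmp]
        refine ih lo (mN : Int) (by omega) h0 (by omega) (by omega) hleft ?_
        intro j hj hjlen
        have : ¬ ends.getD j 0 ≤ s := fun hle =>
          hcmp (le_trans (mono mN j (by omega) hjlen) hle)
        omega
    · rw [dif_neg h]
      exact ⟨h0, by omega, hleft, fun j hj hjlen => hright j (by omega) hjlen⟩
theorem pvPrefFold (v : ℕ → Int) (n : ℕ) :
    ∀ t ≤ n,
      (List.range t).foldl (fun (pm : List Int × Int) j =>
          (pm.1.set j (if v j < pm.2 then v j else pm.2),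
           if v j < pm.2 then v j else pm.2))
        (List.replicate n 0, v 0)
      = ((List.range n).map (fun c => if c < t then pvPref v c else 0),
         if t = 0 then v 0 else pvPref v (t - 1)) := by
  intro t
  induction t with
  | zero =>
    intro _
    simp [List.eq_replicate_iff]
  | succ t ih =>
    intro ht
    rw [List.range_succ, List.foldl_append, ih (by omega)]
    simp only [List.foldl_cons, List.foldl_nil]
    have hm : (if v t < (if t = 0 then v 0 else pvPref v (t - 1)) then v t
        else (if t = 0 then v 0 else pvPref v (t - 1))) = pvPref v t := by
      match t with
      | 0 => simp [pvPref]
      | (t' + 1) => simp only [pvPref]; rfl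
    rw [hm, pvSetMapRange]
    simp only [Prod.mk.injEq]
    refine ⟨?_, by simp⟩
    apply List.map_congr_left
    intro c _
    by_cases hc : c = t
    · subst hc; simp
    · by_cases hlt : c < t
      · simp [hc, hlt, show c < t + 1 from by omega]
      · simp [hc, hlt, show ¬ (c < t + 1) from by omega]
theorem pvMinFold (s : Int) (vv : ℕ → Int) :
    ∀ m : ℕ, (List.range m).foldl (fun a j => min (s + vv j) a) 100000
      = if m = 0 then 100000 else min 100000 (s + pvPref vv (m - 1)) := by
  intro m
  induction m with
  | zero => simp
  | succ m ih =>
    rw [List.range_succ, List.foldl_append, ih]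
    simp only [List.foldl_cons, List.foldl_nil]
    match m with
    | 0 => simp [pvPref]; omega
    | (m' + 1) =>
      rw [if_neg (by omega), if_neg (by omega)]
      simp only [Nat.add_sub_cancel, pvPref]
      by_cases hlt : vv (m' + 1) < pvPref vv m'
      · rw [if_pos hlt]; omega
      · rw [if_neg hlt]; omega
theorem pvCell (S : List (List Int)) (z i : ℕ) (hz : 1 ≤ z) (pos : Int)
    (hpos0 : 0 ≤ pos)
    (hchar : ∀ j : ℕ, j < S.length → (pvE S j ≤ pvS S i ↔ (j : Int) < pos))
    (hi : i < S.length) :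
    pvLev S (z + 1) i =
      (if 0 < min pos (i : Int) then
        (if pvS S i + pvPref (fun j => pvLev S z j - pvE S j) ((min pos (i : Int)).toNat - 1)
            < 100000 then
           pvS S i + pvPref (fun j => pvLev S z j - pvE S j) ((min pos (i : Int)).toNat - 1)
         else 100000)
       else 100000) := by
  obtain ⟨w, rfl⟩ : ∃ w, z = w + 1 := ⟨z - 1, by omega⟩
  set m2N : ℕ := (min pos (i : Int)).toNat with hm2N
  have hm2le : m2N ≤ i := by omega
  show (List.range i).foldl
      (fun a j => if pvS S i ≥ pvE S j then
          min (pvLev S (w + 1) j + |pvE S j - pvS S i|) a else a) 100000 = _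
  have hsplit : List.range i = List.range m2N ++ (List.range (i - m2N)).map (fun x => m2N + x) := by
    rw [← List.range_add]
    congr 1
    omega
  rw [hsplit, List.foldl_append, List.foldl_map]
  -- leading segment: condition true
  have hseg1 : (List.range m2N).foldl
      (fun a j => if pvS S i ≥ pvE S j then
          min (pvLev S (w + 1) j + |pvE S j - pvS S i|) a else a) 100000
      = (List.range m2N).foldl
        (fun a j => min (pvS S i + (pvLev S (w + 1) j - pvE S j)) a) 100000 := by
    apply PySem.List.foldl_congr_mem
    intro acc j hj
    simp only [List.mem_range] at hj
    have hjlen : j < S.length := by omega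
    have hcond : pvE S j ≤ pvS S i := (hchar j hjlen).mpr (by omega)
    rw [if_pos (by omega)]
    have habs : |pvE S j - pvS S i| = pvS S i - pvE S j := by
      rw [abs_of_nonpos (by omega)]; omega
    rw [habs]
    congr 1
    omega
  rw [hseg1]
  -- trailing segment: condition false
  have hseg2 : ∀ (a : Int), (List.range (i - m2N)).foldl
      (fun a x => if pvS S i ≥ pvE S (m2N + x) then
          min (pvLev S (w + 1) (m2N + x) + |pvE S (m2N + x) - pvS S i|) a else a) a = a := by
    intro a
    have : (List.range (i - m2N)).foldl
        (fun a x => if pvS S i ≥ pvE S (m2N + x) then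
            min (pvLev S (w + 1) (m2N + x) + |pvE S (m2N + x) - pvS S i|) a else a) a
        = (List.range (i - m2N)).foldl (fun a _ => a) a := by
      apply PySem.List.foldl_congr_mem
      intro acc x hx
      simp only [List.mem_range] at hx
      have hjlen : m2N + x < S.length := by omega
      have hcond : ¬ (pvE S (m2N + x) ≤ pvS S i) := by
        intro hle
        have := (hchar (m2N + x) hjlen).mp hle
        omega
      rw [if_neg (by omega)]
    rw [this, PySem.List.foldl_ignore]
  rw [hseg2]
  rw [pvMinFold (pvS S i) (fun j => pvLev S (w + 1) j - pvE S j) m2N]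
  by_cases h0 : m2N = 0
  · rw [if_pos h0, if_neg (by omega)]
  · rw [if_neg h0, if_pos (by omega)]
    by_cases hlt : pvS S i + pvPref (fun j => pvLev S (w + 1) j - pvE S j) (m2N - 1) < 100000
    · rw [if_pos hlt]; omega
    · rw [if_neg hlt]; omega
theorem pvB_main (T : List (List Int)) (k : Int) (hT : T ≠ []) (hk : 1 ≤ k) :
    impatientbob_alt T k =
      (if pvBest (PySem.List.sorted T (fun r => PySem.List.pyGetD r 1 0) false) k.toNat
          = 100000 then none
       else some (pvBest (PySem.List.sorted T (fun r => PySem.List.pyGetD r 1 0) false) k.toNat)) := by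
  have hk' : k = (k.toNat : Int) := by omega
  have hk1 : 1 ≤ k.toNat := by omega
  have hN1 : 0 < T.length := List.length_pos_of_ne_nil hT
  set S := PySem.List.sorted T (fun r => PySem.List.pyGetD r 1 0) false with hS
  have hlen : S.length = T.length := PySem.List.length_sorted T _ false
  rw [hk']
  unfold impatientbob_alt
  rw [show ((k.toNat : Int) - 1) = ((k.toNat - 1 : ℕ) : Int) from by omega]
  simp only [PySem.List.len_eq, PySem.List.pyRange_zero, PySem.List.pyRepeat_singleton,
    List.foldl_map, List.map_map, Int.toNat_natCast, Function.comp_def,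
    PySem.List.pySetD_natCast, PySem.List.pyGetD_natCast,
    PySem.List.pyGetD_ofNat', List.map_const', List.length_range, List.length_map, ← hlen]
  rw [if_neg (show ¬((S.length : Int) = 0) from by omega)]
  rw [show (PySem.List.sorted T fun r => r.getD 1 0) = S from by
        rw [hS, ← (funext (fun r => PySem.List.pyGetD_ofNat' r 1 0) :
          (fun (r : List Int) => PySem.List.pyGetD r 1 0) = (fun (r : List Int) => r.getD 1 0))]]
  -- name the one-step transformer
  set E := List.map (fun (t : List Int) => t.getD 1 0) S with hE
  set St := List.map (fun (t : List Int) => t.getD 0 0) S with hSt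
  suffices hfold : ∀ m : ℕ,
      List.foldl
        (fun (x : List Int) (_ : ℕ) =>
          List.foldl
            (fun (x_1 : List Int) (y : ℕ) =>
              if min (pvBisect E (St.getD y 0) 0 ↑S.length) ↑y > 0 then
                if St.getD y 0 +
                    PySem.List.pyGetD
                      (List.foldl
                          (fun (x_2 : List Int × Int) (y : ℕ) =>
                            (x_2.1.set y
                                (if x.getD y 0 - E.getD y 0 < x_2.2 then
                                  x.getD y 0 - E.getD y 0 else x_2.2),
                              if x.getD y 0 - E.getD y 0 < x_2.2 then
                                x.getD y 0 - E.getD y 0 else x_2.2))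
                          (List.replicate S.length 0, x.getD 0 0 - E.getD 0 0)
                          (List.range S.length)).1
                      (min (pvBisect E (St.getD y 0) 0 ↑S.length) ↑y - 1) 0 < 100000 then
                  x_1.set y
                    (St.getD y 0 +
                      PySem.List.pyGetD
                        (List.foldl
                            (fun (x_2 : List Int × Int) (y : ℕ) =>
                              (x_2.1.set y
                                  (if x.getD y 0 - E.getD y 0 < x_2.2 then
                                    x.getD y 0 - E.getD y 0 else x_2.2),
                                if x.getD y 0 - E.getD y 0 < x_2.2 then
                                  x.getD y 0 - E.getD y 0 else x_2.2))
                            (List.replicate S.length 0, x.getD 0 0 - E.getD 0 0)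
                            (List.range S.length)).1
                        (min (pvBisect E (St.getD y 0) 0 ↑S.length) ↑y - 1) 0)
                else x_1
              else x_1)
            (List.replicate S.length 100000) (List.range S.length))
        (List.replicate S.length (0 : Int)) (List.range m)
      = (List.range S.length).map (fun i => pvLev S (m + 1) i) by
    rw [hfold (k.toNat - 1), show k.toNat - 1 + 1 = k.toNat from by omega]
    obtain ⟨N', hN'⟩ : ∃ N', S.length = N' + 1 := ⟨S.length - 1, by omega⟩
    rw [hN', List.range_succ_eq_map, List.map_cons, PySem.List.min?_id_cons]
    have hb : ((List.range N').map Nat.succ |>.map (fun i => pvLev S k.toNat i)).foldl min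
        (pvLev S k.toNat 0) = pvBest S k.toNat := by
      unfold pvBest
      rw [hN', List.range_succ_eq_map]
      simp only [List.foldl_cons, List.foldl_map]
      rw [min_eq_right (pvLev_bounds S k.toNat 0).2]
    rw [hb]
  intro m
  induction m with
  | zero =>
    simp only [List.range_zero, List.foldl_nil]
    rw [show (List.range S.length).map (fun i => pvLev S (0 + 1) i)
          = (List.range S.length).map (fun _ => (0 : Int)) from rfl,
        List.map_const', List.length_range]
  | succ m ihm =>
    rw [List.range_succ, List.foldl_append, ihm]
    simp only [List.foldl_cons, List.foldl_nil]
    -- one step of the level loop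
    have hMgetE : ∀ j : ℕ, j < S.length → E.getD j 0 = pvE S j := by
      intro j hj
      rw [hE, pvGetDMapSelf _ _ _ hj]; rfl
    have hMgetSt : ∀ j : ℕ, j < S.length → St.getD j 0 = pvS S j := by
      intro j hj
      rw [hSt, pvGetDMapSelf _ _ _ hj]; rfl
    have hX : ∀ j : ℕ, j < S.length →
        ((List.range S.length).map (fun i => pvLev S (m + 1) i)).getD j 0 = pvLev S (m + 1) j := by
      intro j hj
      exact PySem.List.getD_map_range _ _ _ _ hj
    -- the prefix-minimum pair fold
    have hPF : List.foldl
        (fun (x_2 : List Int × Int) (y : ℕ) =>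
          (x_2.1.set y
              (if ((List.range S.length).map (fun i => pvLev S (m + 1) i)).getD y 0 - E.getD y 0 < x_2.2 then
                ((List.range S.length).map (fun i => pvLev S (m + 1) i)).getD y 0 - E.getD y 0 else x_2.2),
            if ((List.range S.length).map (fun i => pvLev S (m + 1) i)).getD y 0 - E.getD y 0 < x_2.2 then
              ((List.range S.length).map (fun i => pvLev S (m + 1) i)).getD y 0 - E.getD y 0 else x_2.2))
        (List.replicate S.length 0,
          ((List.range S.length).map (fun i => pvLev S (m + 1) i)).getD 0 0 - E.getD 0 0)
        (List.range S.length)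
        = ((List.range S.length).map
            (fun c => if c < S.length then pvPref (fun j => pvLev S (m + 1) j - pvE S j) c else 0),
           if S.length = 0 then pvLev S (m + 1) 0 - pvE S 0
           else pvPref (fun j => pvLev S (m + 1) j - pvE S j) (S.length - 1)) := by
      have hinit : ((List.range S.length).map (fun i => pvLev S (m + 1) i)).getD 0 0 - E.getD 0 0
          = pvLev S (m + 1) 0 - pvE S 0 := by
        rw [hX 0 (by omega), hMgetE 0 (by omega)]
      rw [hinit]
      rw [PySem.List.foldl_congr_mem _ _
        (fun (x_2 : List Int × Int) (y : ℕ) =>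
          (x_2.1.set y
            (if (fun j => pvLev S (m + 1) j - pvE S j) y < x_2.2 then
              (fun j => pvLev S (m + 1) j - pvE S j) y else x_2.2),
           if (fun j => pvLev S (m + 1) j - pvE S j) y < x_2.2 then
             (fun j => pvLev S (m + 1) j - pvE S j) y else x_2.2)) _ ?_]
      · exact pvPrefFold (fun j => pvLev S (m + 1) j - pvE S j) S.length S.length le_rfl
      · intro acc y hy
        simp only [List.mem_range] at hy
        simp only [hX y hy, hMgetE y hy]
    rw [hPF]
    simp only []
    -- the nxt fold: conditional-set form
    rw [show (fun (x_1 : List Int) (y : ℕ) =>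
        if min (pvBisect E (St.getD y 0) 0 ↑S.length) ↑y > 0 then
          if St.getD y 0 +
              PySem.List.pyGetD
                ((List.range S.length).map
                  (fun c => if c < S.length then pvPref (fun j => pvLev S (m + 1) j - pvE S j) c else 0))
                (min (pvBisect E (St.getD y 0) 0 ↑S.length) ↑y - 1) 0 < 100000 then
            x_1.set y
              (St.getD y 0 +
                PySem.List.pyGetD
                  ((List.range S.length).map
                    (fun c => if c < S.length then pvPref (fun j => pvLev S (m + 1) j - pvE S j) c else 0))
                  (min (pvBisect E (St.getD y 0) 0 ↑S.length) ↑y - 1) 0)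
          else x_1
        else x_1)
      = (fun (x_1 : List Int) (y : ℕ) =>
          if (0 < min (pvBisect E (St.getD y 0) 0 ↑S.length) ↑y ∧
              St.getD y 0 +
                PySem.List.pyGetD
                  ((List.range S.length).map
                    (fun c => if c < S.length then pvPref (fun j => pvLev S (m + 1) j - pvE S j) c else 0))
                  (min (pvBisect E (St.getD y 0) 0 ↑S.length) ↑y - 1) 0 < 100000) then
            x_1.set y
              (St.getD y 0 +
                PySem.List.pyGetD
                  ((List.range S.length).map
                    (fun c => if c < S.length then pvPref (fun j => pvLev S (m + 1) j - pvE S j) c else 0))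
                  (min (pvBisect E (St.getD y 0) 0 ↑S.length) ↑y - 1) 0)
          else x_1) from by
        funext x1 y
        split_ifs with h1 h2 h3 <;> first | rfl | (exfalso; omega)]
    rw [pvCondSetAll _ _ 100000 S.length S.length le_rfl]
    apply List.map_congr_left
    intro i hi
    simp only [List.mem_range] at hi
    rw [hMgetSt i hi]
    -- binary search characterisation
    have hmono : ∀ p q : ℕ, p ≤ q → q < E.length → E.getD p 0 ≤ E.getD q 0 := by
      intro p q hpq hq
      rw [hE, List.length_map] at hq
      rw [hMgetE p (by omega), hMgetE q (by omega)]
      unfold pvE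
      have h1 : (S.getD p []) = S[p] := by
        rw [List.getD_eq_getElem?_getD, List.getElem?_eq_getElem (by omega : p < S.length)]; rfl
      have h2 : (S.getD q []) = S[q] := by
        rw [List.getD_eq_getElem?_getD, List.getElem?_eq_getElem hq]; rfl
      rw [h1, h2]
      have hq' : q < (PySem.List.sorted T (fun r => PySem.List.pyGetD r 1 0)).length := by
        rw [← hS]; exact hq
      have hm := PySem.List.key_sorted_getElem_mono T (fun r => PySem.List.pyGetD r 1 0) hpq hq'
      rw [show (S[p]).getD 1 0 = PySem.List.pyGetD S[p] 1 0 from (PySem.List.pyGetD_ofNat' _ 1 0).symm,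
          show (S[q]).getD 1 0 = PySem.List.pyGetD S[q] 1 0 from (PySem.List.pyGetD_ofNat' _ 1 0).symm]
      exact hm
    have hElen : (E.length : Int) = (S.length : Int) := by rw [hE, List.length_map]
    have hspec := pvBisect_spec E (pvS S i) hmono S.length 0 (S.length : Int)
      (by omega) le_rfl (by omega) (by omega)
      (by intro j hj; omega)
      (by intro j hj hjlen; rw [hE, List.length_map] at hjlen; exfalso; omega)
    set pos := pvBisect E (pvS S i) 0 (S.length : Int) with hposdef
    obtain ⟨hpos0, hposN, hposle, hposgt⟩ := hspec
    have hchar : ∀ j : ℕ, j < S.length → (pvE S j ≤ pvS S i ↔ (j : Int) < pos) := by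
      intro j hj
      constructor
      · intro hle
        by_contra hnot
        have := hposgt j (by omega) (by rw [hE, List.length_map]; omega)
        rw [hMgetE j hj] at this
        omega
      · intro hlt
        have := hposle j hlt
        rw [hMgetE j hj] at this
        exact this
    rw [pvCell S (m + 1) i (by omega) pos hpos0 hchar hi]
    by_cases hpos : 0 < min pos (i : Int)
    · have hm2 : (min pos (i : Int) - 1) = ((((min pos (i : Int)).toNat - 1) : ℕ) : Int) := by omega
      rw [hm2, PySem.List.pyGetD_natCast,
        PySem.List.getD_map_range _ _ _ _ (by omega : (min pos (i : Int)).toNat - 1 < S.length),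
        if_pos (by omega : (min pos (i : Int)).toNat - 1 < S.length)]
      split_ifs with h1 h2 h3 h4 h5 <;> first | rfl | omega
    · rw [if_neg (fun hh => hpos hh.2.1), if_neg hpos]

-- ===== VERDICT (by name: the statement is the Claim_ definition above) =====
theorem impatientbob_spec : Claim_equal_impatientbob := by
  intro T k _hdom hpre
  unfold Spec_impatientbob
  rcases hpre with ⟨_hrows, hk⟩
  by_cases hT : T = []
  · subst hT
    simp [impatientbob, impatientbob_alt, PySem.List.len,
      PySem.List.pyRange_one_eq_nil (by omega : (0:Int) ≤ 0)]
  · rcases hk with hk | hk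
    · exact absurd hk hT
    · rw [pvA_main T k hT hk, pvB_main T k hT hk]
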